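-- pv_equiv track=rewrite | github.com/zhnzhang/transition-amr-parser | scripts/gold_path_metric.py | greedy_matching
-- ===== SOURCE A (Python) =====
-- def greedy_matching(print_pred_paths, print_gold_paths):
--     print_pred_paths2 = [x.lower() for x in print_pred_paths]
--     hits = []
--     for gold_path in print_gold_paths:
--         if gold_path.lower() in print_pred_paths2:
--             hits.append(gold_path)
--             print_pred_paths2.remove(gold_path.lower())
--     return hits, print_pred_paths2
-- ===== SOURCE B (Python) =====
-- def _tally(xs):
--     c = {}
--     for x in xs:
--         c[x] = c.get(x, 0) + 1
--     return c
--
--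
-- def greedy_matching(print_pred_paths, print_gold_paths):
--     # Closed-form matching: each lowered value v is matched exactly
--     # min(#occurrences in preds, #occurrences in golds) times, so a gold/pred
--     # element is a hit/leftover according to its occurrence rank vs that quota.
--     preds = [x.lower() for x in print_pred_paths]
--     golds = [g.lower() for g in print_gold_paths]
--     cp = _tally(preds)
--     cg = _tally(golds)
--     quota = {v: min(cp.get(v, 0), n) for v, n in cg.items()}
--     hits, seen = [], {}
--     for g, gl in zip(print_gold_paths, golds):
--         r = seen.get(gl, 0)
--         seen[gl] = r + 1
--         if r < quota[gl]:
--             hits.append(g)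
--     rest, seen = [], {}
--     for p in preds:
--         r = seen.get(p, 0)
--         seen[p] = r + 1
--         if r >= quota.get(p, 0):
--             rest.append(p)
--     return hits, rest
-- ===== Notes on version B (the rewrite author's own statement) =====
-- stated objective: faster
-- what changed: Replaces A's greedy stateful simulation (linear membership scan + remove on the shrinking lowered pred list per gold) by a closed-form per-value quota min(pred count, gold count) computed up front, after which hits and remainder are two independent occurrence-rank filters over the gold and pred lists.
import Mathlib
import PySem

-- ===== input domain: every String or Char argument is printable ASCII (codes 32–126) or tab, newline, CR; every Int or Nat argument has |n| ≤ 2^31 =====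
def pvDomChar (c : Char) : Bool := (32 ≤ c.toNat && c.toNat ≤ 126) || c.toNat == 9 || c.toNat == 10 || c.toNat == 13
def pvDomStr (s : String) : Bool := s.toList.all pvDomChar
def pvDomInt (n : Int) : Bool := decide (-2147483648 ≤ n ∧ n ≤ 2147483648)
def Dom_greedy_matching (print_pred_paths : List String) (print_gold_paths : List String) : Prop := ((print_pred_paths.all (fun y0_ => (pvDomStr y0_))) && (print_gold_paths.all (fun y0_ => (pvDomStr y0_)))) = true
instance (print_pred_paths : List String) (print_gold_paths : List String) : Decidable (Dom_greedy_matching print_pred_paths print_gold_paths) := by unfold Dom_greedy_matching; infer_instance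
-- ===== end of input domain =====

-- B replaces A's greedy remove-loop by a closed-form per-value quota
-- min(pred count, gold count) plus two independent occurrence-rank filters;
-- same return value.

-- ===== PORT A =====
-- loop body of A's 'for gold_path in print_gold_paths' (state = (hits, print_pred_paths2))
def gmStepA (st : List String × List String) (g : String) : List String × List String :=
  let gl := PySem.Str.lower g
  if st.2.contains gl then (st.1 ++ [g], (PySem.List.remove? st.2 gl).getD st.2) else st

def greedy_matching (print_pred_paths : List String) (print_gold_paths : List String) : List String × List String :=
  let print_pred_paths2 := print_pred_paths.map PySem.Str.lower
  print_gold_paths.foldl gmStepA ([], print_pred_paths2)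

-- ===== PORT B =====
-- B's helper _tally: c[x] = c.get(x, 0) + 1
def gmTallyStep (d : PySem.Dict String Int) (x : String) : PySem.Dict String Int :=
  d.insert x (d.getD x 0 + 1)

def gmTally (xs : List String) : PySem.Dict String Int :=
  xs.foldl gmTallyStep PySem.Dict.empty

-- B's dict comprehension {v: min(cp.get(v, 0), n) for v, n in cg.items()}
def gmQuota (cp cg : PySem.Dict String Int) : PySem.Dict String Int :=
  cg.items.foldl (fun q p => q.insert p.1 (min (cp.getD p.1 0) p.2)) PySem.Dict.empty

-- B's gold loop body (state = (hits, seen)); 'quota[gl]' is exact as getD since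
-- gl is always a key of cg, hence of quota
def gmGoldStep (q : PySem.Dict String Int) (st : List String × PySem.Dict String Int)
    (p : String × String) : List String × PySem.Dict String Int :=
  let r := st.2.getD p.2 0
  ((if r < q.getD p.2 0 then st.1 ++ [p.1] else st.1), st.2.insert p.2 (r + 1))

-- B's pred loop body (state = (rest, seen))
def gmPredStep (q : PySem.Dict String Int) (st : List String × PySem.Dict String Int)
    (x : String) : List String × PySem.Dict String Int :=
  let r := st.2.getD x 0
  ((if q.getD x 0 ≤ r then st.1 ++ [x] else st.1), st.2.insert x (r + 1))

def greedy_matching_alt (print_pred_paths : List String) (print_gold_paths : List String) : List String × List String :=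
  let preds := print_pred_paths.map PySem.Str.lower
  let golds := print_gold_paths.map PySem.Str.lower
  let cp := gmTally preds
  let cg := gmTally golds
  let q := gmQuota cp cg
  let hits := (print_gold_paths.zip golds).foldl (gmGoldStep q) ([], PySem.Dict.empty)
  let rest := preds.foldl (gmPredStep q) ([], PySem.Dict.empty)
  (hits.1, rest.1)

-- ===== PRECONDITION & SPEC =====
def Spec_greedy_matching (print_pred_paths : List String) (print_gold_paths : List String) (out : List String × List String) : Prop := out = greedy_matching_alt print_pred_paths print_gold_paths
instance (print_pred_paths : List String) (print_gold_paths : List String) (out : List String × List String) : Decidable (Spec_greedy_matching print_pred_paths print_gold_paths out) := by unfold Spec_greedy_matching; infer_instance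

-- ===== CLAIM (what is proved, stated in full; the proofs are below) =====
def Claim_equal_greedy_matching : Prop := ∀ (print_pred_paths : List String) (print_gold_paths : List String), Dom_greedy_matching print_pred_paths print_gold_paths → Spec_greedy_matching print_pred_paths print_gold_paths (greedy_matching print_pred_paths print_gold_paths)

-- ===== LEMMAS AND PROOFS =====

-- Canonical capacity model of the hit list: take a gold while capacity remains.
def hitsM : List String → (String → Int) → List String
  | [], _ => []
  | g :: gs, c =>
    let gl := PySem.Str.lower g
    if 0 < c gl then g :: hitsM gs (fun v => if v = gl then c v - 1 else c v)
    else hitsM gs c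

-- Canonical model of the remainder: keep x unless the counter still owes a skip at x.
def skipF : List String → (String → Int) → List String
  | [], _ => []
  | x :: xs, u =>
    if 0 < u x then skipF xs (fun w => if w = x then u x - 1 else u w)
    else x :: skipF xs u

theorem hitsM_cons (g : String) (gs : List String) (c : String → Int) :
    hitsM (g :: gs) c = if 0 < c (PySem.Str.lower g)
      then g :: hitsM gs (fun v => if v = PySem.Str.lower g then c v - 1 else c v)
      else hitsM gs c := rfl

theorem skipF_cons (x : String) (xs : List String) (u : String → Int) :
    skipF (x :: xs) u = if 0 < u x
      then skipF xs (fun w => if w = x then u x - 1 else u w)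
      else x :: skipF xs u := rfl

theorem skipF_zero (xs : List String) : skipF xs (fun _ => (0 : Int)) = xs := by
  induction xs with
  | nil => rfl
  | cons x xs ih => simp [skipF, ih]

theorem skipF_erase : ∀ (xs : List String) (u : String → Int) (v : String),
    (∀ w, 0 ≤ u w) → v ∈ skipF xs u →
    skipF xs (fun w => if w = v then u v + 1 else u w) = (skipF xs u).erase v := by
  intro xs
  induction xs with
  | nil => intro u v _ hv; simp [skipF] at hv
  | cons x xs ih =>
    intro u v hnn hv
    by_cases hx : 0 < u x
    · have hx' : 0 < (fun w => if w = v then u v + 1 else u w) x := by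
        by_cases hxv : x = v
        · subst hxv; simp; omega
        · simpa [hxv] using hx
      have hmem : v ∈ skipF xs (fun w => if w = x then u x - 1 else u w) := by
        simpa [skipF, hx] using hv
      have hnn' : ∀ w, 0 ≤ (fun w => if w = x then u x - 1 else u w) w := by
        intro w; by_cases hwx : w = x <;> simp [hwx] <;> [omega; exact hnn w]
      have hrec := ih (fun w => if w = x then u x - 1 else u w) v hnn' hmem
      have hfun : (fun w => if w = x then (fun w => if w = v then u v + 1 else u w) x - 1
                 else if w = v then u v + 1 else u w)
            = (fun w => if w = v then (fun w => if w = x then u x - 1 else u w) v + 1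
                 else if w = x then u x - 1 else u w) := by
        have h1 := hnn v; have h2 := hnn x
        funext w
        by_cases hwx : w = x <;> by_cases hwv : w = v <;>
          subst_vars <;> simp_all
      calc skipF (x :: xs) (fun w => if w = v then u v + 1 else u w)
          = skipF xs (fun w => if w = x then (fun w => if w = v then u v + 1 else u w) x - 1
                     else if w = v then u v + 1 else u w) := by
            rw [skipF, if_pos hx']
        _ = (skipF xs (fun w => if w = x then u x - 1 else u w)).erase v := by rw [hfun, hrec]
        _ = (skipF (x :: xs) u).erase v := by rw [skipF, if_pos hx]
    · have hu0 : u x = 0 := le_antisymm (by omega) (hnn x)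
      by_cases hxv : x = v
      · subst hxv
        have hc1 : (0 : Int) < (fun w => if w = x then u x + 1 else u w) x := by
          simp; omega
        have hfun : (fun w => if w = x then (fun w => if w = x then u x + 1 else u w) x - 1
                   else (fun w => if w = x then u x + 1 else u w) w) = u := by
          funext w; by_cases hwx : w = x <;> simp [hwx]
        calc skipF (x :: xs) (fun w => if w = x then u x + 1 else u w)
            = skipF xs (fun w => if w = x then (fun w => if w = x then u x + 1 else u w) x - 1
                       else (fun w => if w = x then u x + 1 else u w) w) := by
              rw [skipF, if_pos hc1]
          _ = skipF xs u := by rw [hfun]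
          _ = (skipF (x :: xs) u).erase x := by
              rw [skipF, if_neg hx, List.erase_cons_head]
      · have hv' : v ∈ skipF xs u := by
          have hv2 := hv
          rw [skipF, if_neg hx] at hv2
          rcases List.mem_cons.mp hv2 with h | h
          · exact absurd h.symm hxv
          · exact h
        have hxcond : ¬ (0 : Int) < (fun w => if w = v then u v + 1 else u w) x := by
          simp [hxv]; omega
        have hbeq : (x == v) = false := by simp [hxv]
        calc skipF (x :: xs) (fun w => if w = v then u v + 1 else u w)
            = x :: skipF xs (fun w => if w = v then u v + 1 else u w) := by
              rw [skipF, if_neg hxcond]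
          _ = x :: (skipF xs u).erase v := by rw [ih u v hnn hv']
          _ = (skipF (x :: xs) u).erase v := by
              rw [skipF, if_neg hx]
              simp [hbeq]

-- A's greedy loop produces hitsM of the remaining counts, and its remaining
-- list is the initial lowered preds with min(remaining count, gold count)
-- further occurrences of each value skipped.
theorem loop_simA : ∀ (gg : List String) (hits l lowered : List String) (u : String → Int),
    (∀ v, 0 ≤ u v) → skipF lowered u = l →
    (gg.foldl gmStepA (hits, l)).1 = hits ++ hitsM gg (fun v => (l.count v : Int)) ∧
    (gg.foldl gmStepA (hits, l)).2
      = skipF lowered (fun v => u v + min ((l.count v : Int)) (((gg.map PySem.Str.lower).count v : Int))) := by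
  intro gg
  induction gg with
  | nil =>
    intro hits l lowered u hnn hs
    refine ⟨by simp [hitsM], ?_⟩
    have : (fun v => u v + min ((l.count v : Int)) ((([] : List String).count v : Int))) = u := by
      funext v
      rw [show (([] : List String).count v : Int) = 0 from rfl,
          min_eq_right (Int.natCast_nonneg _)]
      ring
    simpa [this] using hs.symm
  | cons g gg ih =>
    intro hits l lowered u hnn hs
    set gl := PySem.Str.lower g with hgl
    by_cases hmem : gl ∈ l
    · have hrem : (PySem.List.remove? l gl).getD l = l.erase gl := by
        rw [PySem.List.remove?_eq_some_erase l gl hmem]; rfl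
      have hstep : gmStepA (hits, l) g = (hits ++ [g], l.erase gl) := by
        simp [gmStepA, ← hgl, hmem, hrem]
      have hnn' : ∀ w, 0 ≤ (fun w => if w = gl then u gl + 1 else u w) w := by
        intro w; by_cases hw : w = gl <;> simp [hw]
        · have := hnn gl; omega
        · exact hnn w
      have hs' : skipF lowered (fun w => if w = gl then u gl + 1 else u w) = l.erase gl := by
        rw [skipF_erase lowered u gl hnn (hs ▸ hmem), hs]
      have hcnt1 : 1 ≤ l.count gl := List.count_pos_iff.mpr hmem
      have hceq : ∀ v, ((l.erase gl).count v : Int)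
          = if v = gl then (l.count v : Int) - 1 else (l.count v : Int) := by
        intro v
        by_cases hv : v = gl
        · subst hv
          simp only [if_pos rfl, List.count_erase_self]
          push_cast [Nat.cast_sub hcnt1]
          ring
        · rw [if_neg hv]
          exact congrArg Nat.cast (List.count_erase_of_ne hv)
      obtain ⟨ih1, ih2⟩ := ih (hits ++ [g]) (l.erase gl) lowered
        (fun w => if w = gl then u gl + 1 else u w) hnn' hs'
      constructor
      · rw [List.foldl_cons, hstep, ih1,
            show (fun v => ((l.erase gl).count v : Int))
              = (fun v => if v = gl then (l.count v : Int) - 1 else (l.count v : Int))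
              from funext hceq,
            hitsM_cons g gg (fun v => ((l.count v : Int))), ← hgl,
            if_pos (show (0:Int) < (l.count gl : Int) by exact_mod_cast hcnt1)]
        simp
      · rw [List.foldl_cons, hstep, ih2]
        congr 1
        funext v
        show (if v = gl then u gl + 1 else u v)
              + min (((l.erase gl).count v : Int)) (((gg.map PySem.Str.lower).count v : Int))
            = u v + min ((l.count v : Int)) ((((g :: gg).map PySem.Str.lower).count v : Int))
        rw [hceq v]
        by_cases hv : v = gl
        · subst hv
          simp only [if_pos rfl, List.map_cons, ← hgl, List.count_cons_self]
          push_cast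
          have hc : (1:Int) ≤ (l.count gl : Int) := by exact_mod_cast hcnt1
          rcases le_total ((l.count gl : Int) - 1) (((gg.map PySem.Str.lower).count gl : Int)) with h | h
          · rw [min_eq_left h, min_eq_left (by omega)]; ring
          · rw [min_eq_right h, min_eq_right (by omega)]; ring
        · simp only [if_neg hv, List.map_cons, ← hgl]
          rw [List.count_cons_of_ne (show gl ≠ v from fun h => hv h.symm)]
    · have hstep : gmStepA (hits, l) g = (hits, l) := by
        simp [gmStepA, ← hgl, hmem]
      obtain ⟨ih1, ih2⟩ := ih hits l lowered u hnn hs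
      have hc0 : (l.count gl : Int) = 0 := by
        exact_mod_cast congrArg (Nat.cast : Nat → Int) (List.count_eq_zero.mpr hmem)
      constructor
      · rw [List.foldl_cons, hstep, ih1,
            hitsM_cons g gg (fun v => ((l.count v : Int))), ← hgl,
            if_neg (by rw [hc0]; exact lt_irrefl 0)]
      · rw [List.foldl_cons, hstep, ih2]
        congr 1
        funext v
        by_cases hv : v = gl
        · subst hv
          rw [hc0, min_eq_left (Int.natCast_nonneg _), min_eq_left (Int.natCast_nonneg _)]
        · simp only [List.map_cons, ← hgl]
          rw [List.count_cons_of_ne (show gl ≠ v from fun h => hv h.symm)]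

-- gmTally is the Counter of the list.
theorem gmTally_eq (xs : List String) : gmTally xs = PySem.Dict.counter xs := rfl

theorem gmTally_getD (xs : List String) (v : String) :
    (gmTally xs).getD v 0 = (xs.count v : Int) := by
  rw [gmTally_eq, PySem.Dict.getD_counter]

-- Generic: a fold inserting F k for each key k.
theorem getD_foldl_insertF (F : String → Int) (v : String) :
    ∀ (ks : List String) (d : PySem.Dict String Int),
    (ks.foldl (fun q k => q.insert k (F k)) d).getD v 0
      = if v ∈ ks then F v else d.getD v 0 := by
  intro ks
  induction ks with
  | nil => intro d; simp
  | cons k ks ih =>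
    intro d
    rw [List.foldl_cons, ih]
    by_cases hv : v ∈ ks
    · simp [hv]
    · by_cases hvk : v = k <;> simp [hv, hvk, PySem.Dict.getD_insert]

-- The quota dict is the pointwise min of the two counts.
theorem gmQuota_getD (preds golds : List String) (v : String) :
    (gmQuota (gmTally preds) (gmTally golds)).getD v 0
      = min ((preds.count v : Int)) ((golds.count v : Int)) := by
  rw [gmQuota, gmTally_eq golds, PySem.Dict.items_counter, List.foldl_map,
      getD_foldl_insertF (fun k => min ((gmTally preds).getD k 0) ((golds.count k : Int))) v]
  by_cases hv : v ∈ golds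
  · rw [if_pos (by simpa [PySem.Set.mem_ofList] using hv), gmTally_getD]
  · rw [if_neg (by simpa [PySem.Set.mem_ofList] using hv),
        List.count_eq_zero.mpr hv, PySem.Dict.getD_empty]
    rw [show ((0:Nat):Int) = 0 from rfl, min_eq_right (Int.natCast_nonneg (preds.count v))]

-- B's gold loop realises hitsM for the capacity max(quota - seen, 0).
theorem simB_gold (q : PySem.Dict String Int) :
    ∀ (gs : List String) (hits : List String) (seen : PySem.Dict String Int) (c : String → Int),
    (∀ v, c v = max (q.getD v 0 - seen.getD v 0) 0) →
    ((gs.zip (gs.map PySem.Str.lower)).foldl (gmGoldStep q) (hits, seen)).1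
      = hits ++ hitsM gs c := by
  intro gs
  induction gs with
  | nil => intro hits seen c _; simp [hitsM]
  | cons g gs ih =>
    intro hits seen c hc
    set gl := PySem.Str.lower g with hgl
    have hcgl : c gl = max (q.getD gl 0 - seen.getD gl 0) 0 := hc gl
    have hseen' : ∀ v, (seen.insert gl (seen.getD gl 0 + 1)).getD v 0
        = if v = gl then seen.getD gl 0 + 1 else seen.getD v 0 := by
      intro v; rw [PySem.Dict.getD_insert]
    by_cases hlt : seen.getD gl 0 < q.getD gl 0
    · have hpos : 0 < c gl := by rw [hcgl, max_eq_left (by omega)]; omega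
      have hstep : gmGoldStep q (hits, seen) (g, gl)
          = (hits ++ [g], seen.insert gl (seen.getD gl 0 + 1)) := by
        simp [gmGoldStep, hlt]
      have hc' : ∀ v, (if v = gl then c v - 1 else c v)
          = max (q.getD v 0 - (seen.insert gl (seen.getD gl 0 + 1)).getD v 0) 0 := by
        intro v
        rw [hseen' v]
        by_cases hv : v = gl
        · subst hv
          rw [if_pos rfl, if_pos rfl, hcgl,
              max_eq_left (by omega), max_eq_left (by omega)]
          ring
        · rw [if_neg hv, if_neg hv]; exact hc v
      calc (((g :: gs).zip ((g :: gs).map PySem.Str.lower)).foldl (gmGoldStep q) (hits, seen)).1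
          = ((gs.zip (gs.map PySem.Str.lower)).foldl (gmGoldStep q)
              (hits ++ [g], seen.insert gl (seen.getD gl 0 + 1))).1 := by
            simp only [List.map_cons, List.zip_cons_cons, List.foldl_cons, ← hgl, hstep]
        _ = (hits ++ [g]) ++ hitsM gs (fun v => if v = gl then c v - 1 else c v) :=
            ih (hits ++ [g]) (seen.insert gl (seen.getD gl 0 + 1)) _ hc'
        _ = hits ++ hitsM (g :: gs) c := by
            rw [hitsM_cons, ← hgl, if_pos hpos]
            simp
    · have hnpos : ¬ 0 < c gl := by rw [hcgl, max_eq_right (by omega)]; omega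
      have hstep : gmGoldStep q (hits, seen) (g, gl)
          = (hits, seen.insert gl (seen.getD gl 0 + 1)) := by
        simp [gmGoldStep, hlt]
      have hc' : ∀ v, c v
          = max (q.getD v 0 - (seen.insert gl (seen.getD gl 0 + 1)).getD v 0) 0 := by
        intro v
        rw [hseen' v]
        by_cases hv : v = gl
        · subst hv
          rw [if_pos rfl, hcgl, max_eq_right (by omega), max_eq_right (by omega)]
        · rw [if_neg hv]; exact hc v
      calc (((g :: gs).zip ((g :: gs).map PySem.Str.lower)).foldl (gmGoldStep q) (hits, seen)).1
          = ((gs.zip (gs.map PySem.Str.lower)).foldl (gmGoldStep q)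
              (hits, seen.insert gl (seen.getD gl 0 + 1))).1 := by
            simp only [List.map_cons, List.zip_cons_cons, List.foldl_cons, ← hgl, hstep]
        _ = hits ++ hitsM gs c := ih hits (seen.insert gl (seen.getD gl 0 + 1)) c hc'
        _ = hits ++ hitsM (g :: gs) c := by rw [hitsM_cons, ← hgl, if_neg hnpos]

-- B's pred loop realises skipF for the owed-skip count max(quota - seen, 0).
theorem simB_pred (q : PySem.Dict String Int) :
    ∀ (xs : List String) (acc : List String) (seen : PySem.Dict String Int) (u : String → Int),
    (∀ v, u v = max (q.getD v 0 - seen.getD v 0) 0) →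
    (xs.foldl (gmPredStep q) (acc, seen)).1 = acc ++ skipF xs u := by
  intro xs
  induction xs with
  | nil => intro acc seen u _; simp [skipF]
  | cons x xs ih =>
    intro acc seen u hu
    have hux : u x = max (q.getD x 0 - seen.getD x 0) 0 := hu x
    have hseen' : ∀ v, (seen.insert x (seen.getD x 0 + 1)).getD v 0
        = if v = x then seen.getD x 0 + 1 else seen.getD v 0 := by
      intro v; rw [PySem.Dict.getD_insert]
    by_cases hle : q.getD x 0 ≤ seen.getD x 0
    · -- kept in the remainder; skipF keeps x and u is unchanged (u x = 0)
      have hnpos : ¬ 0 < u x := by rw [hux, max_eq_right (by omega)]; omega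
      have hstep : gmPredStep q (acc, seen) x = (acc ++ [x], seen.insert x (seen.getD x 0 + 1)) := by
        simp [gmPredStep, hle]
      have hu' : ∀ v, u v = max (q.getD v 0 - (seen.insert x (seen.getD x 0 + 1)).getD v 0) 0 := by
        intro v
        rw [hseen' v]
        by_cases hv : v = x
        · subst hv
          rw [if_pos rfl, hux, max_eq_right (by omega), max_eq_right (by omega)]
        · rw [if_neg hv]; exact hu v
      calc ((x :: xs).foldl (gmPredStep q) (acc, seen)).1
          = (xs.foldl (gmPredStep q) (acc ++ [x], seen.insert x (seen.getD x 0 + 1))).1 := by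
            rw [List.foldl_cons, hstep]
        _ = (acc ++ [x]) ++ skipF xs u := ih (acc ++ [x]) (seen.insert x (seen.getD x 0 + 1)) u hu'
        _ = acc ++ skipF (x :: xs) u := by rw [skipF_cons, if_neg hnpos]; simp
    · have hpos : 0 < u x := by rw [hux, max_eq_left (by omega)]; omega
      have hstep : gmPredStep q (acc, seen) x = (acc, seen.insert x (seen.getD x 0 + 1)) := by
        simp [gmPredStep, hle]
      have hu' : ∀ v, (if v = x then u x - 1 else u v)
          = max (q.getD v 0 - (seen.insert x (seen.getD x 0 + 1)).getD v 0) 0 := by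
        intro v
        rw [hseen' v]
        by_cases hv : v = x
        · subst hv
          rw [if_pos rfl, if_pos rfl, hux, max_eq_left (by omega), max_eq_left (by omega)]
          ring
        · rw [if_neg hv, if_neg hv]; exact hu v
      calc ((x :: xs).foldl (gmPredStep q) (acc, seen)).1
          = (xs.foldl (gmPredStep q) (acc, seen.insert x (seen.getD x 0 + 1))).1 := by
            rw [List.foldl_cons, hstep]
        _ = acc ++ skipF xs (fun w => if w = x then u x - 1 else u w) :=
            ih acc (seen.insert x (seen.getD x 0 + 1)) _ hu'
        _ = acc ++ skipF (x :: xs) u := by rw [skipF_cons, if_pos hpos]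

-- Clipping the capacity at the gold count does not change hitsM.
theorem hitsM_min : ∀ (gs : List String) (c : String → Int), (∀ v, 0 ≤ c v) →
    hitsM gs (fun v => min (c v) (((gs.map PySem.Str.lower).count v : Int))) = hitsM gs c := by
  intro gs
  induction gs with
  | nil => intro c _; rfl
  | cons g gs ih =>
    intro c hnn
    set gl := PySem.Str.lower g with hgl
    have hcnt : ∀ v, (((g :: gs).map PySem.Str.lower).count v : Int)
        = (if v = gl then 1 else 0) + ((gs.map PySem.Str.lower).count v : Int) := by
      intro v
      by_cases hv : v = gl
      · subst hv
        simp only [if_pos rfl, List.map_cons, ← hgl, List.count_cons_self]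
        push_cast
        ring
      · simp only [if_neg hv, List.map_cons, ← hgl]
        rw [List.count_cons_of_ne (show gl ≠ v from fun h => hv h.symm)]
        ring
    have htnn : ∀ v, (0:Int) ≤ ((gs.map PySem.Str.lower).count v : Int) :=
      fun v => Int.natCast_nonneg _
    by_cases hpos : 0 < c gl
    · have hposm : 0 < min (c gl) ((((g :: gs).map PySem.Str.lower).count gl : Int)) := by
        rw [hcnt gl, if_pos rfl]
        have := htnn gl
        rcases le_total (c gl) (1 + ((gs.map PySem.Str.lower).count gl : Int)) with h | h
        · rw [min_eq_left h]; omega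
        · rw [min_eq_right h]; omega
      have hnn' : ∀ v, 0 ≤ (if v = gl then c v - 1 else c v) := by
        intro v
        by_cases hv : v = gl
        · subst hv; rw [if_pos rfl]; omega
        · rw [if_neg hv]; exact hnn v
      have hfe : (fun v => if v = gl
            then min (c v) ((((g :: gs).map PySem.Str.lower).count v : Int)) - 1
            else min (c v) ((((g :: gs).map PySem.Str.lower).count v : Int)))
          = (fun v => min ((fun w => if w = gl then c w - 1 else c w) v)
              (((gs.map PySem.Str.lower).count v : Int))) := by
        funext v
        show (if v = gl
            then min (c v) ((((g :: gs).map PySem.Str.lower).count v : Int)) - 1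
            else min (c v) ((((g :: gs).map PySem.Str.lower).count v : Int)))
          = min (if v = gl then c v - 1 else c v) (((gs.map PySem.Str.lower).count v : Int))
        rw [hcnt v]
        by_cases hv : v = gl
        · subst hv
          rw [if_pos rfl, if_pos rfl, if_pos rfl]
          rcases le_total (c gl) (1 + ((gs.map PySem.Str.lower).count gl : Int)) with h | h
          · rw [min_eq_left h, min_eq_left (by omega)]
          · rw [min_eq_right h, min_eq_right (by omega)]
            ring
        · rw [if_neg hv, if_neg hv, if_neg hv]
          ring_nf
      calc hitsM (g :: gs) (fun v => min (c v) ((((g :: gs).map PySem.Str.lower).count v : Int)))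
          = g :: hitsM gs (fun v => if v = gl
              then min (c v) ((((g :: gs).map PySem.Str.lower).count v : Int)) - 1
              else min (c v) ((((g :: gs).map PySem.Str.lower).count v : Int))) := by
            rw [hitsM_cons, ← hgl, if_pos hposm]
        _ = g :: hitsM gs (fun w => if w = gl then c w - 1 else c w) := by
            rw [hfe, ih _ hnn']
        _ = hitsM (g :: gs) c := by rw [hitsM_cons, ← hgl, if_pos hpos]
    · have hc0 : c gl = 0 := le_antisymm (by omega) (hnn gl)
      have hnposm : ¬ 0 < min (c gl) ((((g :: gs).map PySem.Str.lower).count gl : Int)) := by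
        rw [hc0, min_eq_left (Int.natCast_nonneg _)]
        omega
      have hfe : (fun v => min (c v) ((((g :: gs).map PySem.Str.lower).count v : Int)))
          = (fun v => min (c v) (((gs.map PySem.Str.lower).count v : Int))) := by
        funext v
        rw [hcnt v]
        by_cases hv : v = gl
        · subst hv
          rw [if_pos rfl, hc0, min_eq_left (by have := htnn gl; omega),
              min_eq_left (htnn gl)]
        · rw [if_neg hv]; ring_nf
      calc hitsM (g :: gs) (fun v => min (c v) ((((g :: gs).map PySem.Str.lower).count v : Int)))
          = hitsM gs (fun v => min (c v) (((gs.map PySem.Str.lower).count v : Int))) := by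
            rw [hitsM_cons, ← hgl, if_neg hnposm, hfe]
        _ = hitsM gs c := ih c hnn
        _ = hitsM (g :: gs) c := by rw [hitsM_cons, ← hgl, if_neg (by rw [hc0]; omega)]

-- ===== VERDICT (by name: the statement is the Claim_ definition above) =====
theorem greedy_matching_spec : Claim_equal_greedy_matching := by
  intro pp gg _
  unfold Spec_greedy_matching
  show greedy_matching pp gg = greedy_matching_alt pp gg
  unfold greedy_matching greedy_matching_alt
  dsimp only
  set lowered := pp.map PySem.Str.lower with hlow
  set q := gmQuota (gmTally lowered) (gmTally (gg.map PySem.Str.lower)) with hq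
  have hqv : ∀ v, q.getD v 0
      = min ((lowered.count v : Int)) (((gg.map PySem.Str.lower).count v : Int)) :=
    fun v => gmQuota_getD lowered (gg.map PySem.Str.lower) v
  have hqnn : ∀ v, 0 ≤ q.getD v 0 := by
    intro v; rw [hqv v]
    exact le_min (Int.natCast_nonneg _) (Int.natCast_nonneg _)
  have hinv : ∀ v, q.getD v 0
      = max (q.getD v 0 - (PySem.Dict.empty : PySem.Dict String Int).getD v 0) 0 := by
    intro v
    rw [PySem.Dict.getD_empty]
    have := hqnn v
    rw [max_eq_left (by omega)]
    ring
  obtain ⟨hA1, hA2⟩ := loop_simA gg [] lowered lowered (fun _ => 0)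
    (fun _ => le_refl 0) (skipF_zero lowered)
  have hB1 := simB_gold q gg [] PySem.Dict.empty (fun v => q.getD v 0) hinv
  have hB2 := simB_pred q lowered [] PySem.Dict.empty (fun v => q.getD v 0) hinv
  refine Prod.ext ?_ ?_
  · rw [hA1, hB1]
    simp only [List.nil_append]
    rw [show (fun v => q.getD v 0)
        = (fun v => min ((lowered.count v : Int)) (((gg.map PySem.Str.lower).count v : Int)))
        from funext hqv]
    exact (hitsM_min gg (fun v => ((lowered.count v : Int)))
      (fun v => Int.natCast_nonneg _)).symm
  · rw [hA2, hB2]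
    simp only [List.nil_append]
    congr 1
    funext v
    rw [hqv v]
    ring
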